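-- pv_equiv track=rewrite | github.com/mkosmala/SnapshotSerengetiScripts | plurality_consensus.py | calculate_num_animals
-- ===== SOURCE A (Python) =====
-- import math
--
-- def calculate_num_animals(noa):
--
--     nums = []
--     tens = []
--     meds = []
--     many = []
--     for ea in noa:
--         if len(ea)==1:
--             nums.append(ea)
--         elif ea=="10":
--             tens.append(ea)
--         elif ea=="11-50":
--             meds.append(ea)
--         else:
--             many.append(ea)
--     nums.sort()
--     sorted_list = nums + tens + meds + many
--     # round up (gotta choose one or the other)
--     medind = int(math.ceil((len(sorted_list)+1)/2)-1)
--     return [sorted_list[0],sorted_list[medind],sorted_list[-1]]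
-- ===== SOURCE B (Python) =====
-- def calculate_num_animals(noa):
--     # Counting pass: bucket single-char labels by code, count "10"/"11-50", keep the rest.
--     counts = [0] * 128
--     tens = 0
--     meds = 0
--     many = []
--     for ea in noa:
--         if len(ea) == 1:
--             counts[ord(ea)] += 1
--         elif ea == "10":
--             tens += 1
--         elif ea == "11-50":
--             meds += 1
--         else:
--             many.append(ea)
--     # Reconstruct the ordered list from the buckets (counting sort, no comparison sort).
--     ordered = []
--     for c in range(128):
--         ordered += [chr(c)] * counts[c]
--     ordered += ["10"] * tens
--     ordered += ["11-50"] * meds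
--     ordered += many
--     return [ordered[0], ordered[len(ordered) // 2], ordered[-1]]
-- ===== Notes on version B (the rewrite author's own statement) =====
-- stated objective: alternative
-- what changed: Replaces the partition-into-four-lists plus comparison sort of the single-character labels by a counting pass over a 128-slot ASCII bucket array (plus counters for '10'/'11-50'), reconstructing the ordered list from the buckets instead of sorting.
import Mathlib
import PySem

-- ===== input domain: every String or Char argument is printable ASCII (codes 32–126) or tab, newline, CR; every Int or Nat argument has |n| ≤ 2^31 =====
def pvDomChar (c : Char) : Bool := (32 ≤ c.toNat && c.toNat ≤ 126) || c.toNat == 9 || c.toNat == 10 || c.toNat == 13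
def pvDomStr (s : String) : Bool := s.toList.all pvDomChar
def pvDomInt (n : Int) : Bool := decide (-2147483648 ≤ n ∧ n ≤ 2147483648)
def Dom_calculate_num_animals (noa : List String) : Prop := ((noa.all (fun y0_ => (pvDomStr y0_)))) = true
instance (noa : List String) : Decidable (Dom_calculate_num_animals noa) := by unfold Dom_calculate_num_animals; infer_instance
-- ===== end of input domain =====

-- B replaces A's comparison sort of the single-character labels by a counting pass over a
-- 128-slot ASCII bucket array and reconstructs the ordered list from the buckets.

-- ===== PORT A =====
-- loop body of A's partitioning 'for ea in noa' (state: nums, tens, meds, many)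
def pvStepA (s : List String × List String × List String × List String) (ea : String) :
    List String × List String × List String × List String :=
  if PySem.Str.len ea == 1 then (s.1 ++ [ea], s.2.1, s.2.2.1, s.2.2.2)
  else if ea == "10" then (s.1, s.2.1 ++ [ea], s.2.2.1, s.2.2.2)
  else if ea == "11-50" then (s.1, s.2.1, s.2.2.1 ++ [ea], s.2.2.2)
  else (s.1, s.2.1, s.2.2.1, s.2.2.2 ++ [ea])

def calculate_num_animals (noa : List String) : List String :=
  let s := noa.foldl pvStepA ([], [], [], [])
  let sorted_list := PySem.List.sorted s.1 (fun x => x) false ++ s.2.1 ++ s.2.2.1 ++ s.2.2.2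
  -- int(math.ceil((len+1)/2)-1): float division by 2 and ceil are exact for list lengths; ceil(k/2) = -((-k)//2)
  let medind := -(PySem.Int.floordiv (-((sorted_list.length : Int) + 1)) 2) - 1
  [(PySem.List.pyGet? sorted_list 0).getD "",
   (PySem.List.pyGet? sorted_list medind).getD "",
   (PySem.List.pyGet? sorted_list (-1)).getD ""]

-- ===== PORT B =====
-- ord(ea) for the single-character string ea (B only evaluates it under the len(ea) == 1 guard)
def pvOrd (ea : String) : Nat := (ea.toList.headD (Char.ofNat 0)).toNat

-- loop body of B's counting 'for ea in noa' (state: counts, tens, meds, many);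
-- counts[ord(ea)] += 1 is exact for codes < 128, i.e. on every string of Dom
def pvStepB (s : List Int × Int × Int × List String) (ea : String) :
    List Int × Int × Int × List String :=
  if PySem.Str.len ea == 1 then
    (s.1.set (pvOrd ea) (s.1.getD (pvOrd ea) 0 + 1), s.2.1, s.2.2.1, s.2.2.2)
  else if ea == "10" then (s.1, s.2.1 + 1, s.2.2.1, s.2.2.2)
  else if ea == "11-50" then (s.1, s.2.1, s.2.2.1 + 1, s.2.2.2)
  else (s.1, s.2.1, s.2.2.1, s.2.2.2 ++ [ea])

def calculate_num_animals_alt (noa : List String) : List String :=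
  let s := noa.foldl pvStepB (PySem.List.pyRepeat [(0 : Int)] 128, 0, 0, [])
  -- for c in range(128): ordered += [chr(c)] * counts[c]
  let ordered := (PySem.List.pyRange 0 128).foldl
    (fun acc c => acc ++ PySem.List.pyRepeat [String.ofList [Char.ofNat c.toNat]] (s.1.getD c.toNat 0)) []
  let ordered := ordered ++ PySem.List.pyRepeat ["10"] s.2.1
      ++ PySem.List.pyRepeat ["11-50"] s.2.2.1 ++ s.2.2.2
  [(PySem.List.pyGet? ordered 0).getD "",
   (PySem.List.pyGet? ordered (PySem.Int.floordiv ((ordered.length : Int)) 2)).getD "",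
   (PySem.List.pyGet? ordered (-1)).getD ""]

-- ===== PRECONDITION & SPEC =====
-- Pre_ excludes only the empty list, on which the Python A raises IndexError (sorted_list[0]).
def Pre_calculate_num_animals (noa : List String) : Prop := noa ≠ []
instance (noa : List String) : Decidable (Pre_calculate_num_animals noa) := by
  unfold Pre_calculate_num_animals; infer_instance
def pvWitness_calculate_num_animals : List String := ["3"]
def Spec_calculate_num_animals (noa : List String) (out : List String) : Prop := out = calculate_num_animals_alt noa
instance (noa : List String) (out : List String) : Decidable (Spec_calculate_num_animals noa out) := by unfold Spec_calculate_num_animals; infer_instance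

-- ===== CLAIM (what is proved, stated in full; the proofs are below) =====
def Claim_equal_calculate_num_animals : Prop := ∀ (noa : List String), Dom_calculate_num_animals noa → Pre_calculate_num_animals noa → Spec_calculate_num_animals noa (calculate_num_animals noa)

-- ===== LEMMAS AND PROOFS =====

-- the single-character label built from code k
def pvChr (k : Nat) : String := String.ofList [Char.ofNat k]

-- the relation the two loop states keep in lock-step
def pvInv (a : List String × List String × List String × List String)
    (b : List Int × Int × Int × List String) : Prop :=
  b.1.length = 128 ∧
  (∀ k : Nat, k < 128 → b.1.getD k 0 = (a.1.count (pvChr k) : Int)) ∧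
  (∀ t ∈ a.1, ∃ c : Char, t = String.ofList [c] ∧ c.toNat < 128) ∧
  0 ≤ b.2.1 ∧ a.2.1 = List.replicate b.2.1.toNat "10" ∧
  0 ≤ b.2.2.1 ∧ a.2.2.1 = List.replicate b.2.2.1.toNat "11-50" ∧
  a.2.2.2 = b.2.2.2

lemma pvChr_toNat {k : Nat} (hk : k < 128) : (Char.ofNat k).toNat = k := by
  rw [Char.toNat_ofNat]; simp [Nat.isValidChar]; omega

lemma pvChr_le {a b : Nat} (ha : a < 128) (hb : b < 128) (h : a ≤ b) : pvChr a ≤ pvChr b := by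
  rcases Nat.lt_or_ge b a with h' | h'
  · omega
  · rcases Nat.eq_or_lt_of_le h' with h' | h'
    · rw [h']
    · refine le_of_lt ?_
      have hlt : Char.ofNat a < Char.ofNat b := by
        show (Char.ofNat a).val < (Char.ofNat b).val
        refine UInt32.lt_iff_toNat_lt.mpr ?_
        show (Char.ofNat a).toNat < (Char.ofNat b).toNat
        rw [pvChr_toNat ha, pvChr_toNat hb]; exact h'
      rw [pvChr, pvChr, String.lt_iff_toList_lt]
      simpa using List.Lex.rel hlt

lemma pv_getD_set_self (l : List Int) (i : Nat) (v : Int) : (l.set i v).getD i 0 = if i < l.length then v else 0 := by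
  rw [List.getD_eq_getElem?_getD, List.getElem?_set]
  split_ifs with h1 h2 <;> simp_all

lemma pv_getD_set_ne (l : List Int) (i k : Nat) (v : Int) (hne : k ≠ i) :
    (l.set i v).getD k 0 = l.getD k 0 := by
  rw [List.getD_eq_getElem?_getD, List.getElem?_set, if_neg (fun h => hne h.symm),
    ← List.getD_eq_getElem?_getD]

lemma pvInv_init : pvInv ([], [], [], []) (List.replicate 128 (0 : Int), 0, 0, []) := by
  refine ⟨by simp, ?_, by simp, by simp, by simp, by simp, by simp, by simp⟩
  intro k hk
  rw [List.getD_eq_getElem?_getD, List.getElem?_replicate]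
  simp only [hk, if_pos, Option.getD_some, List.count_nil, Nat.cast_zero]

lemma pvInv_step (a : List String × List String × List String × List String)
    (b : List Int × Int × Int × List String) (ea : String)
    (hdom : pvDomStr ea = true) (h : pvInv a b) : pvInv (pvStepA a ea) (pvStepB b ea) := by
  obtain ⟨hlen, hcnt, hshape, ht0, ht, hm0, hm, hmany⟩ := h
  by_cases h1 : PySem.Str.len ea = 1
  · -- single-character branch
    have h1b : (PySem.Str.len ea == 1) = true := by simpa using h1
    have hlen1 : ea.toList.length = 1 := by
      rw [PySem.Str.len_eq] at h1; exact_mod_cast h1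
    obtain ⟨c, hc⟩ := List.length_eq_one_iff.mp hlen1
    have hea : ea = String.ofList [c] := by rw [← hc, String.ofList_toList]
    have hc128 : c.toNat < 128 := by
      have := hdom; rw [pvDomStr, hc] at this; simp [pvDomChar] at this; omega
    have hord : pvOrd ea = c.toNat := by simp [pvOrd, hc]
    have hchr : pvChr c.toNat = ea := by rw [pvChr, Char.ofNat_toNat, ← hea]
    simp only [pvStepA, pvStepB, h1b, if_true]
    refine ⟨by simpa using hlen, ?_, ?_, ht0, by simpa using ht, hm0, by simpa using hm,
      by simpa using hmany⟩
    · intro k hk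
      simp only
      by_cases hki : k = pvOrd ea
      · rw [hki, pv_getD_set_self, if_pos (by rw [hlen, hord]; exact hc128)]
        rw [hcnt (pvOrd ea) (by rw [hord]; exact hc128)]
        rw [hord, hchr]
        simp [List.count_append]
      · rw [pv_getD_set_ne _ _ _ _ hki, hcnt k hk]
        have hne : pvChr k ≠ ea := by
          intro he
          apply hki
          rw [hord]
          have hck : Char.ofNat k = c := by
            have := congrArg String.toList he
            rw [pvChr, hea] at this; simpa using this
          rw [← hck, pvChr_toNat hk]
        rw [List.count_append, List.count_singleton, if_neg (by simpa using hne.symm)]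
        push_cast; ring
    · intro t htm
      simp only [List.mem_append, List.mem_singleton] at htm
      rcases htm with htm | htm
      · exact hshape t htm
      · exact ⟨c, by rw [htm, hea], hc128⟩
  · have h1b : (PySem.Str.len ea == 1) = false := by simpa using h1
    by_cases h2 : ea = "10"
    · subst h2
      simp only [pvStepA, pvStepB, h1b, Bool.false_eq_true, if_false, beq_self_eq_true, if_true]
      refine ⟨hlen, hcnt, hshape, ?_, ?_, hm0, hm, hmany⟩
      · show (0:Int) ≤ b.2.1 + 1
        omega
      · show a.2.1 ++ ["10"] = List.replicate ((b.2.1 + 1).toNat) "10"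
        rw [ht, show (b.2.1 + 1).toNat = b.2.1.toNat + 1 by omega, List.replicate_succ']
    · by_cases h3 : ea = "11-50"
      · subst h3
        simp only [pvStepA, pvStepB, h1b, Bool.false_eq_true, if_false,
          show (("11-50" : String) == "10") = false by decide, beq_self_eq_true, if_true]
        refine ⟨hlen, hcnt, hshape, ht0, ht, ?_, ?_, hmany⟩
        · show (0:Int) ≤ b.2.2.1 + 1
          omega
        · show a.2.2.1 ++ ["11-50"] = List.replicate ((b.2.2.1 + 1).toNat) "11-50"
          rw [hm, show (b.2.2.1 + 1).toNat = b.2.2.1.toNat + 1 by omega, List.replicate_succ']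
      · have h2b : (ea == "10") = false := by simpa using h2
        have h3b : (ea == "11-50") = false := by simpa using h3
        simp only [pvStepA, pvStepB, h1b, h2b, h3b, Bool.false_eq_true, if_false]
        exact ⟨hlen, hcnt, hshape, ht0, ht, hm0, hm, by rw [hmany]⟩

lemma pvInv_foldl (noa : List String) (hdom : ∀ x ∈ noa, pvDomStr x = true)
    (a : List String × List String × List String × List String)
    (b : List Int × Int × Int × List String) (h : pvInv a b) :
    pvInv (noa.foldl pvStepA a) (noa.foldl pvStepB b) := by
  induction noa generalizing a b with
  | nil => simpa
  | cons x xs ih =>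
      simp only [List.foldl_cons]
      exact ih (fun y hy => hdom y (by simp [hy])) _ _ (pvInv_step a b x (hdom x (by simp)) h)

lemma pv_sum_ite (n j : Nat) (hj : j < n) (v : Nat → Nat) :
    ((List.range n).map (fun k => if k = j then v k else 0)).sum = v j := by
  induction n with
  | zero => exact absurd hj (by omega)
  | succ m ih =>
      rw [List.range_succ, List.map_append, List.sum_append]
      by_cases h : j = m
      · subst h
        have hz : ((List.range j).map (fun k => if k = j then v k else 0)).sum = 0 := by
          apply List.sum_eq_zero
          intro x hx
          obtain ⟨k, hk, hkx⟩ := List.mem_map.mp hx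
          rw [← hkx, if_neg (by have := List.mem_range.mp hk; omega)]
        simp [hz]
      · have hj' : j < m := by omega
        simp [Ne.symm h, ih hj']

lemma pv_pairwise_flatMap (C : List Nat) (g : Nat → String) (n : Nat → Nat)
    (h : C.Pairwise fun a b => g a ≤ g b) :
    (C.flatMap fun k => List.replicate (n k) (g k)).Pairwise (· ≤ ·) := by
  induction C with
  | nil => simp
  | cons c cs ih =>
      rw [List.flatMap_cons, List.pairwise_append]
      refine ⟨List.pairwise_replicate.mpr (Or.inr (le_refl _)), ih (List.pairwise_cons.mp h).2, ?_⟩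
      intro x hx y hy
      rw [List.eq_of_mem_replicate hx]
      obtain ⟨k, hk, hy'⟩ := List.mem_flatMap.mp hy
      rw [List.eq_of_mem_replicate hy']
      exact (List.pairwise_cons.mp h).1 k hk

-- counting sort over the 128 ASCII buckets reproduces sorted(nums)
lemma pv_counting_sorted (nums : List String)
    (h : ∀ t ∈ nums, ∃ c : Char, t = String.ofList [c] ∧ c.toNat < 128) :
    PySem.List.sorted nums (fun x => x) false
      = (List.range 128).flatMap (fun k => List.replicate (nums.count (pvChr k)) (pvChr k)) := by
  apply PySem.List.sorted_id_eq_of_perm_of_pairwise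
  · rw [List.perm_iff_count]
    intro s
    rw [List.count_flatMap]
    simp only [Function.comp_def]
    have hrepl : ∀ k : Nat, List.count s (List.replicate (nums.count (pvChr k)) (pvChr k))
        = if pvChr k = s then nums.count (pvChr k) else 0 := by
      intro k; simp [List.count_replicate]
    by_cases hs : ∃ c : Char, s = String.ofList [c] ∧ c.toNat < 128
    · obtain ⟨c, hsc, hc128⟩ := hs
      have hiff : ∀ k : Nat, k < 128 → (pvChr k = s ↔ k = c.toNat) := by
        intro k hk
        constructor
        · intro he
          have : Char.ofNat k = c := by
            have := congrArg String.toList he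
            rw [pvChr, hsc] at this; simpa using this
          rw [← this, pvChr_toNat hk]
        · intro he
          rw [he, pvChr, Char.ofNat_toNat, ← hsc]
      rw [List.map_congr_left (g := fun k => if k = c.toNat then nums.count (pvChr k) else 0)
        (by intro k hk
            rw [hrepl k, if_congr (hiff k (List.mem_range.mp hk)) rfl rfl])]
      rw [pv_sum_ite 128 c.toNat hc128]
      rw [pvChr, Char.ofNat_toNat, ← hsc]
    · have hz : ∀ k : Nat, k < 128 → List.count s (List.replicate (nums.count (pvChr k)) (pvChr k)) = 0 := by
        intro k hk
        rw [hrepl k, if_neg]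
        intro he
        exact hs ⟨Char.ofNat k, by rw [← he, pvChr], by rw [pvChr_toNat hk]; exact hk⟩
      have hsum : ((List.range 128).map
          (fun k => List.count s (List.replicate (nums.count (pvChr k)) (pvChr k)))).sum = 0 := by
        apply List.sum_eq_zero
        intro x hx
        obtain ⟨k, hk, hkx⟩ := List.mem_map.mp hx
        rw [← hkx]; exact hz k (List.mem_range.mp hk)
      rw [hsum]
      symm
      rw [List.count_eq_zero]
      intro hmem
      exact hs (h s hmem)
  · apply pv_pairwise_flatMap
    exact List.pairwise_lt_range.imp_of_mem
      (fun {a b} ha hb hab => pvChr_le (List.mem_range.mp ha) (List.mem_range.mp hb) (le_of_lt hab))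

lemma pv_medind (L : Int) : -(PySem.Int.floordiv (-(L + 1)) 2) - 1 = PySem.Int.floordiv L 2 := by
  rw [PySem.Int.floordiv_eq_ediv_of_pos (by norm_num), PySem.Int.floordiv_eq_ediv_of_pos (by norm_num)]
  omega

theorem pv_main (noa : List String) (hdom : Dom_calculate_num_animals noa) :
    calculate_num_animals noa = calculate_num_animals_alt noa := by
  have hdom' : ∀ x ∈ noa, pvDomStr x = true := by
    rw [Dom_calculate_num_animals, List.all_eq_true] at hdom
    simpa using hdom
  have hinit : (PySem.List.pyRepeat [(0 : Int)] 128, (0 : Int), (0 : Int), ([] : List String))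
      = (List.replicate 128 (0 : Int), 0, 0, []) := by
    rw [PySem.List.pyRepeat_singleton]; rfl
  have inv := pvInv_foldl noa hdom' ([], [], [], []) (List.replicate 128 (0 : Int), 0, 0, []) pvInv_init
  obtain ⟨hlen, hcnt, hshape, ht0, ht, hm0, hm, hmany⟩ := inv
  set A := noa.foldl pvStepA ([], [], [], []) with hA
  set B := noa.foldl pvStepB (List.replicate 128 (0 : Int), 0, 0, []) with hB
  -- B's bucket reconstruction is sorted(A.nums)
  have hrange : PySem.List.pyRange 0 128 = (List.range 128).map (fun k : Nat => (k : Int)) := by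
    rw [show (128 : Int) = ((128 : Nat) : Int) by norm_num, PySem.List.pyRange_zero_natCast]
  have hordered : (PySem.List.pyRange 0 128).foldl
      (fun acc c => acc ++ PySem.List.pyRepeat [String.ofList [Char.ofNat c.toNat]] (B.1.getD c.toNat 0)) []
      = PySem.List.sorted A.1 (fun x => x) false := by
    rw [PySem.List.foldl_append_eq_flatMap, List.nil_append, hrange, List.flatMap_map]
    rw [pv_counting_sorted A.1 hshape]
    symm
    apply List.flatMap_congr
    intro k hk
    have hk' : k < 128 := List.mem_range.mp hk
    rw [Int.toNat_natCast, PySem.List.pyRepeat_singleton, hcnt k hk', Int.toNat_natCast, pvChr]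
  simp only [calculate_num_animals, calculate_num_animals_alt]
  rw [hinit]
  rw [hordered, PySem.List.pyRepeat_singleton, PySem.List.pyRepeat_singleton, ← ht, ← hm, ← hmany]
  rw [pv_medind]

-- ===== VERDICT (by name: the statement is the Claim_ definition above) =====
theorem calculate_num_animals_spec : Claim_equal_calculate_num_animals := by
  intro noa hdom _
  exact pv_main noa hdom
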